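-- pv_equiv track=rewrite | github.com/iej0710/practice_for_coding_test | baekjoon/DFS_BFS/2573.py | year_after
-- ===== SOURCE A (Python) =====
-- def year_after(table):
--     delta_x = [1, -1, 0, 0]
--     delta_y = [0, 0, 1, -1]
--     res = [[0] * len(table[0]) for i in range(len(table))]
--     for i in range(len(table)):
--         for j in range(len(table[i])):
--             if table[i][j] > 0:
--                 count = 0
--                 for dx, dy in zip(delta_x, delta_y):
--                     nx, ny = i + dx, j + dy
--                     if 0 <= nx < len(table) and 0 <= ny < len(table[i]) and table[nx][ny] == 0:
--                         count += 1
--                 res[i][j] = max(0, table[i][j] - count)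
--     return res
-- ===== SOURCE B (Python) =====
-- def year_after(table):
--     n = len(table)
--     melt = [[0] * len(row) for row in table]
--     for i, row in enumerate(table):
--         for j, v in enumerate(row):
--             if v == 0:
--                 for ni, nj in ((i + 1, j), (i - 1, j), (i, j + 1), (i, j - 1)):
--                     if 0 <= ni < n and 0 <= nj < len(table[ni]):
--                         melt[ni][nj] += 1
--     return [[max(0, v - melt[i][j]) if v > 0 else 0
--              for j, v in enumerate(row)]
--             for i, row in enumerate(table)]
-- ===== Notes on version B (the rewrite author's own statement) =====
-- stated objective: alternative
-- what changed: Replaces A's per-land-cell gather (for each positive cell, probe its four neighbours for zeros into a mutable result matrix indexed by range loops) by a two-phase scatter: one pass builds a melt-count matrix by incrementing the land neighbours of every sea (0) cell, a second pass maps each row to max(0, v - melt) for positive v.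
-- outside the precondition, e.g. on year_after([[1], [0, 0]]): A returns [[0], [0]], B returns [[0], [0, 0]]
import Mathlib
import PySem

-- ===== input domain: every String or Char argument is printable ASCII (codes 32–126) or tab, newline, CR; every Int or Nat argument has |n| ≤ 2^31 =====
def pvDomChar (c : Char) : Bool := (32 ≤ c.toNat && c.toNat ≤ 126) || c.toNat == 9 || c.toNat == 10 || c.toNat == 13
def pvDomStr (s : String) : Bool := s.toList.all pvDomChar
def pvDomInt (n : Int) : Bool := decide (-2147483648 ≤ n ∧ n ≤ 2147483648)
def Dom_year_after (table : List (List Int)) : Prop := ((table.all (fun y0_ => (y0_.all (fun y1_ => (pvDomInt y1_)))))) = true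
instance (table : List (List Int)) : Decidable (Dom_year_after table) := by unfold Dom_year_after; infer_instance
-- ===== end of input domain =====

-- B replaces A's per-land-cell gather of zero neighbours by a two-phase scatter
-- (every sea cell increments a melt-count matrix at its in-bounds neighbours,
-- then a map pass clamps); same cost, genuinely different traversal ("alternative").


-- shared cell read: M[i][j] with defaults (every use below is at an in-range index)
def cellD (M : List (List Int)) (i j : Nat) : Int := (M.getD i []).getD j 0

-- ===== PORT A =====
-- res[i][j] = v  (Python list assignment; in range on every admitted input)
def pySetCell (res : List (List Int)) (i j : Nat) (v : Int) : List (List Int) :=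
  res.set i ((res.getD i []).set j v)

-- the inner `for dx, dy in zip(delta_x, delta_y)` counting loop of A
def countA (table : List (List Int)) (i j : Nat) : Int :=
  (List.zip [(1 : Int), -1, 0, 0] [(0 : Int), 0, 1, -1]).foldl
    (fun count d =>
      if 0 ≤ (i : Int) + d.1 ∧ (i : Int) + d.1 < (table.length : Int) ∧
         0 ≤ (j : Int) + d.2 ∧ (j : Int) + d.2 < ((table.getD i []).length : Int) ∧
         cellD table ((i : Int) + d.1).toNat ((j : Int) + d.2).toNat = 0
      then count + 1 else count) 0

-- body of A's inner `for j in range(len(table[i]))`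
def stepCell (table : List (List Int)) (i : Nat) (res : List (List Int)) (j : Nat) :
    List (List Int) :=
  if cellD table i j > 0 then
    pySetCell res i j (max 0 (cellD table i j - countA table i j))
  else res

-- body of A's outer `for i in range(len(table))`
def stepRow (table : List (List Int)) (res : List (List Int)) (i : Nat) : List (List Int) :=
  (List.range ((table.getD i []).length)).foldl (stepCell table i) res

def year_after (table : List (List Int)) : List (List Int) :=
  (List.range table.length).foldl (stepRow table)
    (table.map (fun _ => List.replicate ((table.getD 0 []).length) (0 : Int)))

-- ===== PORT B =====
-- melt[ni][nj] += 1 guarded by the bounds test (body of B's neighbour loop)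
def bumpB (table : List (List Int)) (melt : List (List Int)) (p : Int × Int) :
    List (List Int) :=
  if 0 ≤ p.1 ∧ p.1 < (table.length : Int) ∧
     0 ≤ p.2 ∧ p.2 < ((table.getD p.1.toNat []).length : Int) then
    melt.set p.1.toNat ((melt.getD p.1.toNat []).set p.2.toNat (cellD melt p.1.toNat p.2.toNat + 1))
  else melt

-- the tuple ((i+1,j), (i-1,j), (i,j+1), (i,j-1)) of B
def nbrsB (i j : Nat) : List (Int × Int) :=
  [((i : Int) + 1, (j : Int)), ((i : Int) - 1, (j : Int)),
   ((i : Int), (j : Int) + 1), ((i : Int), (j : Int) - 1)]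

-- body of B's inner `for j, v in enumerate(row)` of the scatter pass
def scatterCell (table : List (List Int)) (i : Nat) (melt : List (List Int))
    (vj : Int × Nat) : List (List Int) :=
  if vj.1 = 0 then (nbrsB i vj.2).foldl (bumpB table) melt else melt

-- body of B's outer `for i, row in enumerate(table)` of the scatter pass
def scatterRow (table : List (List Int)) (melt : List (List Int)) (ri : List Int × Nat) :
    List (List Int) :=
  ri.1.zipIdx.foldl (scatterCell table ri.2) melt

-- the finished melt matrix of B
def meltOf (table : List (List Int)) : List (List Int) :=
  table.zipIdx.foldl (scatterRow table)
    (table.map (fun row => List.replicate row.length (0 : Int)))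

def year_after_alt (table : List (List Int)) : List (List Int) :=
  table.zipIdx.map (fun ri =>
    ri.1.zipIdx.map (fun vj =>
      if vj.1 > 0 then max 0 (vj.1 - cellD (meltOf table) ri.2 vj.2) else 0))

-- ===== PRECONDITION & SPEC =====
-- Pre_ excludes ragged tables (rows of unequal length): there A either raises
-- IndexError or returns a result whose row widths are row 0's width, an accident
-- of its `len(table[0])`-shaped result matrix; B keeps each row's own width.
def Pre_year_after (table : List (List Int)) : Prop :=
  ∀ row ∈ table, row.length = (table.headD []).length
instance (table : List (List Int)) : Decidable (Pre_year_after table) := by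
  unfold Pre_year_after; infer_instance

def pvWitness_year_after : List (List Int) := [[1, 0], [0, 4]]

def Spec_year_after (table : List (List Int)) (out : List (List Int)) : Prop :=
  out = year_after_alt table
instance (table : List (List Int)) (out : List (List Int)) :
    Decidable (Spec_year_after table out) := by unfold Spec_year_after; infer_instance

-- ===== CLAIM (what is proved, stated in full; the proofs are below) =====
def Claim_equal_year_after : Prop :=
  ∀ (table : List (List Int)), Dom_year_after table → Pre_year_after table →
    Spec_year_after table (year_after table)

-- ===== LEMMAS AND PROOFS =====

-- `M has the same shape as t` (row count and all row lengths)
def shapeEq (M t : List (List Int)) : Prop :=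
  M.length = t.length ∧ ∀ a, (M.getD a []).length = (t.getD a []).length

-- 0/1 indicator: position (x,y) is inside t and holds a 0
def indZ (t : List (List Int)) (x y : Int) : Nat :=
  if 0 ≤ x ∧ x < (t.length : Int) then
    if 0 ≤ y ∧ y < ((t.getD x.toNat []).length : Int) ∧ cellD t x.toNat y.toNat = 0 then 1
    else 0
  else 0

theorem headD_eq_getD_zero (t : List (List Int)) : t.headD [] = t.getD 0 [] := by
  cases t <;> rfl

theorem getD_set_ne' (l : List Int) (i j : Nat) (a : Int) (h : i ≠ j) :
    (l.set i a).getD j 0 = l.getD j 0 := by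
  simp [List.getD, List.getElem?_set_ne h]

theorem getD_set_self' (l : List Int) (i : Nat) (a : Int) (h : i < l.length) :
    (l.set i a).getD i 0 = a := by
  simp [List.getD, List.getElem?_set_self h]

theorem getDl_set_ne (l : List (List Int)) (i j : Nat) (a : List Int) (h : i ≠ j) :
    (l.set i a).getD j [] = l.getD j [] := by
  simp [List.getD, List.getElem?_set_ne h]

theorem getDl_set_self (l : List (List Int)) (i : Nat) (a : List Int) (h : i < l.length) :
    (l.set i a).getD i [] = a := by
  simp [List.getD, List.getElem?_set_self h]

theorem shapeEq_set (M t : List (List Int)) (i j : Nat) (v : Int)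
    (h : shapeEq M t) : shapeEq (M.set i ((M.getD i []).set j v)) t := by
  obtain ⟨h1, h2⟩ := h
  refine ⟨by simpa using h1, fun a => ?_⟩
  by_cases hai : i = a
  · subst hai
    by_cases hi : i < M.length
    · rw [getDl_set_self _ _ _ hi]; simpa using h2 i
    · rw [List.set_eq_of_length_le (by omega)]; exact h2 i
  · rw [getDl_set_ne _ _ _ _ hai]; exact h2 a

-- === B side: bump / fold-of-bumps characterised by List.count ===

theorem bumpB_shape (t M : List (List Int)) (p : Int × Int) (h : shapeEq M t) :
    shapeEq (bumpB t M p) t := by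
  unfold bumpB
  split_ifs with hg
  · exact shapeEq_set _ _ _ _ _ h
  · exact h

theorem bumpB_get (t M : List (List Int)) (p : Int × Int) (a b : Nat)
    (h : shapeEq M t) (ha : a < t.length) (hb : b < (t.getD a []).length) :
    cellD (bumpB t M p) a b =
      cellD M a b + (if p = ((a : Int), (b : Int)) then 1 else 0) := by
  obtain ⟨h1, h2⟩ := h
  by_cases hp : p = ((a : Int), (b : Int))
  · subst hp
    rw [if_pos rfl]
    unfold bumpB
    split_ifs with hg
    · simp only [Int.toNat_natCast]
      unfold cellD
      rw [getDl_set_self _ _ _ (by omega), getD_set_self' _ _ _ (by rw [h2 a]; exact hb)]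
    · exfalso
      apply hg
      refine ⟨Int.natCast_nonneg a, ?_, Int.natCast_nonneg b, ?_⟩
      · show ((a : Nat) : Int) < ((t.length : Nat) : Int)
        exact_mod_cast ha
      · show ((b : Nat) : Int) < ((t.getD ((a : Int)).toNat []).length : Int)
        rw [Int.toNat_natCast]
        exact_mod_cast hb
  · rw [if_neg hp]
    unfold bumpB
    split_ifs with hg
    · obtain ⟨g1, g2, g3, g4⟩ := hg
      by_cases hpa : p.1.toNat = a
      · have hpb : p.2.toNat ≠ b := by
          intro hc
          apply hp
          have e1 : p.1 = (a : Int) := by omega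
          have e2 : p.2 = (b : Int) := by omega
          exact Prod.ext e1 e2
        unfold cellD
        rw [hpa, getDl_set_self _ _ _ (by omega), getD_set_ne' _ _ _ _ hpb]
        simp
      · unfold cellD
        rw [getDl_set_ne _ _ _ _ hpa]
        simp
    · simp

theorem foldl_bumpB_count (t : List (List Int)) (L : List (Int × Int)) (a b : Nat)
    (ha : a < t.length) (hb : b < (t.getD a []).length) :
    ∀ (M : List (List Int)), shapeEq M t →
      cellD (L.foldl (bumpB t) M) a b =
        cellD M a b + (L.count ((a : Int), (b : Int)) : Int) := by
  induction L with
  | nil => intro M _; simp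
  | cons p L ih =>
    intro M h
    rw [List.foldl_cons, ih _ (bumpB_shape t M p h), bumpB_get t M p a b ⟨h.1, h.2⟩ ha hb,
      List.count_cons]
    by_cases hp : p = ((a : Int), (b : Int))
    · simp [hp]
      ring
    · simp [hp]

-- === flattening B's nested scatter loops into one op list ===

def opsOf (i : Nat) (vj : Int × Nat) : List (Int × Int) :=
  if vj.1 = 0 then nbrsB i vj.2 else []

def opsAll (t : List (List Int)) : List (Int × Int) :=
  t.zipIdx.flatMap (fun ri => ri.1.zipIdx.flatMap (fun vj => opsOf ri.2 vj))

theorem foldl_flatMap_eq {α β γ : Type} (l : List α) (g : α → List β) (f : γ → β → γ) :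
    ∀ (init : γ),
      (l.flatMap g).foldl f init = l.foldl (fun acc x => (g x).foldl f acc) init := by
  induction l with
  | nil => intro init; rfl
  | cons x l ih => intro init; simp only [List.flatMap_cons, List.foldl_append,
      List.foldl_cons]; exact ih _

theorem scatterCell_eq_ops (t : List (List Int)) (i : Nat) (melt : List (List Int))
    (vj : Int × Nat) : scatterCell t i melt vj = (opsOf i vj).foldl (bumpB t) melt := by
  unfold scatterCell opsOf
  split_ifs <;> rfl

theorem meltOf_eq_ops (t : List (List Int)) :
    meltOf t = (opsAll t).foldl (bumpB t)
      (t.map (fun row => List.replicate row.length (0 : Int))) := by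
  unfold meltOf opsAll
  rw [foldl_flatMap_eq]
  congr 1
  funext acc ri
  unfold scatterRow
  rw [foldl_flatMap_eq]
  congr 1
  funext acc' vj
  exact scatterCell_eq_ops t ri.2 acc' vj

-- === counting the ops that target a fixed cell ===

theorem count_flatMap' {α : Type} (l : List α) (g : α → List (Int × Int)) (x : Int × Int) :
    (l.flatMap g).count x = (l.map (fun e => (g e).count x)).sum := by
  induction l with
  | nil => rfl
  | cons e l ih => simp [List.count_append, ih]

-- generic "pick the term with index = x" summation over zipIdx
theorem sum_zipIdx_pick {α : Type} (d : α) (F : α → Nat) :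
    ∀ (l : List α) (k : Nat) (x : Int),
      ((l.zipIdx k).map (fun p => if ((p.2 : Nat) : Int) = x then F p.1 else 0)).sum =
        if (k : Int) ≤ x ∧ x < (k : Int) + l.length then F (l.getD (x.toNat - k) d) else 0 := by
  intro l
  induction l with
  | nil =>
    intro k x
    simp only [List.zipIdx_nil, List.map_nil, List.sum_nil, List.length_nil]
    rw [if_neg (by omega)]
  | cons a l ih =>
    intro k x
    rw [List.zipIdx_cons]
    simp only [List.map_cons, List.sum_cons, List.length_cons]
    rw [ih (k + 1) x]
    by_cases hx : ((k : Nat) : Int) = x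
    · rw [if_pos hx, if_neg (by omega), if_pos (by constructor <;> omega)]
      have h0 : x.toNat - k = 0 := by omega
      rw [h0]
      simp
    · rw [if_neg hx]
      by_cases h2 : (k : Int) ≤ x ∧ x < (k : Int) + (l.length + 1)
      · rw [if_pos (by omega), if_pos (by omega)]
        have hs : x.toNat - k = (x.toNat - (k + 1)) + 1 := by omega
        rw [hs, List.getD_cons_succ]
        omega
      · rw [if_neg (by omega), if_neg (by omega)]

-- inner 0/1 sum over one row, gated on the row index
theorem sum_row_gated (row : List Int) (x y : Int) (i : Nat) :
    ((row.zipIdx).map (fun vj =>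
        if ((i : Nat) : Int) = x then
          if ((vj.2 : Nat) : Int) = y then (if vj.1 = 0 then 1 else 0) else 0
        else 0)).sum =
      if ((i : Nat) : Int) = x then
        (if (0 : Int) ≤ y ∧ y < (row.length : Int) ∧ row.getD y.toNat 0 = 0 then 1 else 0)
      else 0 := by
  by_cases hx : ((i : Nat) : Int) = x
  · simp only [hx, if_true]
    have h := sum_zipIdx_pick (0 : Int) (fun v => if v = 0 then 1 else 0) row 0 y
    simp only [Nat.cast_zero, zero_add, Nat.sub_zero] at h
    rw [h]
    split_ifs <;> tauto
  · simp [hx]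

-- the double sum localises to the single indicator indZ
theorem double_sum_indZ (t : List (List Int)) (x y : Int) :
    ((t.zipIdx).map (fun ri =>
        ((ri.1.zipIdx).map (fun vj =>
          if ((ri.2 : Nat) : Int) = x then
            if ((vj.2 : Nat) : Int) = y then (if vj.1 = 0 then 1 else 0) else 0
          else 0)).sum)).sum = indZ t x y := by
  have hcong : (t.zipIdx).map (fun ri =>
      ((ri.1.zipIdx).map (fun vj =>
        if ((ri.2 : Nat) : Int) = x then
          if ((vj.2 : Nat) : Int) = y then (if vj.1 = 0 then 1 else 0) else 0
        else 0)).sum) =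
      (t.zipIdx).map (fun ri =>
        if ((ri.2 : Nat) : Int) = x then
          (if (0 : Int) ≤ y ∧ y < (ri.1.length : Int) ∧ ri.1.getD y.toNat 0 = 0 then 1 else 0)
        else 0) := by
    apply List.map_congr_left
    intro ri _
    exact sum_row_gated ri.1 x y ri.2
  rw [hcong]
  have h := sum_zipIdx_pick ([] : List Int)
      (fun row => if (0 : Int) ≤ y ∧ y < (row.length : Int) ∧ row.getD y.toNat 0 = 0 then 1 else 0)
      t 0 x
  simp only [Nat.cast_zero, zero_add, Nat.sub_zero] at h
  rw [h]
  unfold indZ cellD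
  split_ifs <;> tauto

-- per-cell op count split into the four directions
theorem count_opsOf (i j : Nat) (v : Int) (a b : Nat) :
    (opsOf i (v, j)).count ((a : Int), (b : Int)) =
      (if ((i : Nat) : Int) = (a : Int) - 1 then
         if ((j : Nat) : Int) = (b : Int) then (if v = 0 then 1 else 0) else 0 else 0) +
      (if ((i : Nat) : Int) = (a : Int) + 1 then
         if ((j : Nat) : Int) = (b : Int) then (if v = 0 then 1 else 0) else 0 else 0) +
      (if ((i : Nat) : Int) = (a : Int) then
         if ((j : Nat) : Int) = (b : Int) - 1 then (if v = 0 then 1 else 0) else 0 else 0) +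
      (if ((i : Nat) : Int) = (a : Int) then
         if ((j : Nat) : Int) = (b : Int) + 1 then (if v = 0 then 1 else 0) else 0 else 0) := by
  by_cases hv : v = 0
  · have ho : opsOf i (v, j) = nbrsB i j := by simp [opsOf, hv]
    rw [ho]
    unfold nbrsB
    simp only [hv, List.count_cons, List.count_nil, beq_iff_eq, Prod.mk.injEq]
    split_ifs <;> omega
  · have ho : opsOf i (v, j) = [] := by simp [opsOf, hv]
    rw [ho]
    simp [hv]

theorem count_opsAll (t : List (List Int)) (a b : Nat) :
    (opsAll t).count ((a : Int), (b : Int)) =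
      indZ t ((a : Int) - 1) (b : Int) + indZ t ((a : Int) + 1) (b : Int) +
      indZ t (a : Int) ((b : Int) - 1) + indZ t (a : Int) ((b : Int) + 1) := by
  unfold opsAll
  rw [count_flatMap']
  have hrw : (t.zipIdx).map
      (fun ri => ((ri.1.zipIdx.flatMap (fun vj => opsOf ri.2 vj)).count ((a : Int), (b : Int)))) =
      (t.zipIdx).map (fun ri =>
        ((ri.1.zipIdx).map (fun vj =>
          (if ((ri.2 : Nat) : Int) = (a : Int) - 1 then
             if ((vj.2 : Nat) : Int) = (b : Int) then (if vj.1 = 0 then 1 else 0) else 0 else 0) +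
          ((if ((ri.2 : Nat) : Int) = (a : Int) + 1 then
             if ((vj.2 : Nat) : Int) = (b : Int) then (if vj.1 = 0 then 1 else 0) else 0 else 0) +
          ((if ((ri.2 : Nat) : Int) = (a : Int) then
             if ((vj.2 : Nat) : Int) = (b : Int) - 1 then (if vj.1 = 0 then 1 else 0) else 0 else 0) +
           (if ((ri.2 : Nat) : Int) = (a : Int) then
             if ((vj.2 : Nat) : Int) = (b : Int) + 1 then (if vj.1 = 0 then 1 else 0) else 0 else 0))))).sum) := by
    apply List.map_congr_left
    intro ri _
    rw [count_flatMap']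
    apply congrArg
    apply List.map_congr_left
    intro vj _
    have h := count_opsOf ri.2 vj.2 vj.1 a b
    rw [show ((vj.1, vj.2) : Int × Nat) = vj from rfl] at h
    rw [h]
    ring
  rw [hrw]
  have hsplit : ∀ {α : Type} (f g : α → Nat) (l : List α),
      (l.map (fun p => f p + g p)).sum = (l.map f).sum + (l.map g).sum := by
    intro α f g l
    rw [← List.sum_map_add]
  calc ((t.zipIdx).map (fun ri =>
        ((ri.1.zipIdx).map (fun vj =>
          (if ((ri.2 : Nat) : Int) = (a : Int) - 1 then
             if ((vj.2 : Nat) : Int) = (b : Int) then (if vj.1 = 0 then 1 else 0) else 0 else 0) +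
          ((if ((ri.2 : Nat) : Int) = (a : Int) + 1 then
             if ((vj.2 : Nat) : Int) = (b : Int) then (if vj.1 = 0 then 1 else 0) else 0 else 0) +
          ((if ((ri.2 : Nat) : Int) = (a : Int) then
             if ((vj.2 : Nat) : Int) = (b : Int) - 1 then (if vj.1 = 0 then 1 else 0) else 0 else 0) +
           (if ((ri.2 : Nat) : Int) = (a : Int) then
             if ((vj.2 : Nat) : Int) = (b : Int) + 1 then (if vj.1 = 0 then 1 else 0) else 0 else 0))))).sum)).sum
      = ((t.zipIdx).map (fun ri =>
          ((ri.1.zipIdx).map (fun vj =>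
            if ((ri.2 : Nat) : Int) = (a : Int) - 1 then
              if ((vj.2 : Nat) : Int) = (b : Int) then (if vj.1 = 0 then 1 else 0) else 0 else 0)).sum +
          (((ri.1.zipIdx).map (fun vj =>
            if ((ri.2 : Nat) : Int) = (a : Int) + 1 then
              if ((vj.2 : Nat) : Int) = (b : Int) then (if vj.1 = 0 then 1 else 0) else 0 else 0)).sum +
          (((ri.1.zipIdx).map (fun vj =>
            if ((ri.2 : Nat) : Int) = (a : Int) then
              if ((vj.2 : Nat) : Int) = (b : Int) - 1 then (if vj.1 = 0 then 1 else 0) else 0 else 0)).sum +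
          ((ri.1.zipIdx).map (fun vj =>
            if ((ri.2 : Nat) : Int) = (a : Int) then
              if ((vj.2 : Nat) : Int) = (b : Int) + 1 then (if vj.1 = 0 then 1 else 0) else 0 else 0)).sum)))).sum := by
        apply congrArg
        apply List.map_congr_left
        intro ri _
        rw [hsplit, hsplit, hsplit]
    _ = indZ t ((a : Int) - 1) (b : Int) + indZ t ((a : Int) + 1) (b : Int) +
        indZ t (a : Int) ((b : Int) - 1) + indZ t (a : Int) ((b : Int) + 1) := by
        rw [hsplit, hsplit, hsplit]
        rw [double_sum_indZ, double_sum_indZ, double_sum_indZ, double_sum_indZ]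
        ring

theorem melt0_shape (t : List (List Int)) :
    shapeEq (t.map (fun row => List.replicate row.length (0 : Int))) t := by
  refine ⟨by simp, fun a => ?_⟩
  by_cases ha : a < t.length
  · rw [List.getD_eq_getElem _ _ (by simpa using ha), List.getD_eq_getElem _ _ ha]
    simp
  · rw [List.getD_eq_default _ _ (by simpa using ha), List.getD_eq_default _ _ (by omega)]

theorem getD_zero_of_all (l : List Int) (h : ∀ x ∈ l, x = 0) (b : Nat) :
    l.getD b 0 = 0 := by
  by_cases hb : b < l.length
  · rw [List.getD_eq_getElem _ _ hb]
    exact h _ (List.getElem_mem hb)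
  · rw [List.getD_eq_default _ _ (by omega)]

theorem melt0_zero (t : List (List Int)) (a b : Nat) :
    cellD (t.map (fun row => List.replicate row.length (0 : Int))) a b = 0 := by
  unfold cellD
  apply getD_zero_of_all
  intro x hx
  by_cases ha : a < (t.map (fun row => List.replicate row.length (0 : Int))).length
  · rw [List.getD_eq_getElem _ _ ha, List.getElem_map] at hx
    exact List.eq_of_mem_replicate hx
  · rw [List.getD_eq_default _ _ (by omega)] at hx
    simp at hx

-- the finished melt matrix holds exactly the number of zero neighbours
theorem meltOf_cell (t : List (List Int)) (a b : Nat)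
    (ha : a < t.length) (hb : b < (t.getD a []).length) :
    cellD (meltOf t) a b =
      ((indZ t ((a : Int) - 1) (b : Int) + indZ t ((a : Int) + 1) (b : Int) +
        indZ t (a : Int) ((b : Int) - 1) + indZ t (a : Int) ((b : Int) + 1) : Nat) : Int) := by
  rw [meltOf_eq_ops,
    foldl_bumpB_count t (opsAll t) a b ha hb _ (melt0_shape t),
    melt0_zero, count_opsAll]
  ring

-- === A side: the gather count as the same indicators, and the range/set folds ===

theorem rect_row (t : List (List Int)) (hp : Pre_year_after t) (i : Nat) (hi : i < t.length) :
    (t.getD i []).length = (t.getD 0 []).length := by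
  rw [← headD_eq_getD_zero, List.getD_eq_getElem _ _ hi]
  exact hp _ (List.getElem_mem hi)

-- one direction of A's count equals the indicator (needs equal row widths)
theorem ind_eq (t : List (List Int)) (a b : Nat)
    (hm : ∀ i : Nat, i < t.length → (t.getD i []).length = (t.getD a []).length)
    (dx dy : Int) :
    (if 0 ≤ (a : Int) + dx ∧ (a : Int) + dx < (t.length : Int) ∧
        0 ≤ (b : Int) + dy ∧ (b : Int) + dy < ((t.getD a []).length : Int) ∧
        cellD t ((a : Int) + dx).toNat ((b : Int) + dy).toNat = 0
     then (1 : Int) else 0) = ((indZ t ((a : Int) + dx) ((b : Int) + dy) : Nat) : Int) := by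
  unfold indZ
  by_cases hC : (0 ≤ (a : Int) + dx ∧ (a : Int) + dx < (t.length : Int) ∧
      0 ≤ (b : Int) + dy ∧ (b : Int) + dy < ((t.getD a []).length : Int) ∧
      cellD t ((a : Int) + dx).toNat ((b : Int) + dy).toNat = 0)
  · obtain ⟨c1, c2, c3, c4, c5⟩ := hC
    have c4' : (b : Int) + dy < ((t.getD (((a : Int) + dx).toNat) []).length : Int) := by
      rw [hm (((a : Int) + dx).toNat) (by omega)]
      exact c4
    rw [if_pos ⟨c1, c2, c3, c4, c5⟩, if_pos ⟨c1, c2⟩, if_pos ⟨c3, c4', c5⟩]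
    simp
  · rw [if_neg hC]
    by_cases hO : (0 ≤ (a : Int) + dx ∧ (a : Int) + dx < (t.length : Int))
    · have hni : ¬(0 ≤ (b : Int) + dy ∧
          (b : Int) + dy < ((t.getD (((a : Int) + dx).toNat) []).length : Int) ∧
          cellD t ((a : Int) + dx).toNat ((b : Int) + dy).toNat = 0) := by
        rintro ⟨g1, g2, g3⟩
        rw [hm (((a : Int) + dx).toNat) (by omega)] at g2
        exact hC ⟨hO.1, hO.2, g1, g2, g3⟩
      rw [if_pos hO, if_neg hni]
      simp
    · rw [if_neg hO]
      simp

theorem countA_eq (t : List (List Int)) (hp : Pre_year_after t) (a b : Nat)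
    (ha : a < t.length) :
    countA t a b =
      ((indZ t ((a : Int) + 1) (b : Int) + indZ t ((a : Int) - 1) (b : Int) +
        indZ t (a : Int) ((b : Int) + 1) + indZ t (a : Int) ((b : Int) - 1) : Nat) : Int) := by
  have hm : ∀ i : Nat, i < t.length → (t.getD i []).length = (t.getD a []).length := by
    intro i hi
    rw [rect_row t hp i hi, rect_row t hp a ha]
  have hz : List.zip [(1 : Int), -1, 0, 0] [(0 : Int), 0, 1, -1] =
      [((1 : Int), (0 : Int)), (-1, 0), (0, 1), (0, -1)] := rfl
  have hstep : ∀ (c : Prop) [Decidable c] (x : Int),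
      (if c then x + 1 else x) = x + (if c then (1 : Int) else 0) := by
    intro c _ x
    split_ifs <;> ring
  unfold countA
  rw [hz]
  simp only [List.foldl_cons, List.foldl_nil]
  simp only [hstep]
  rw [ind_eq t a b hm 1 0, ind_eq t a b hm (-1) 0, ind_eq t a b hm 0 1, ind_eq t a b hm 0 (-1)]
  rw [show ((a : Int) + -1) = (a : Int) - 1 from by ring,
    show ((b : Int) + -1) = (b : Int) - 1 from by ring]
  simp only [add_zero]
  push_cast
  ring

theorem setCell_get (M : List (List Int)) (i j a b : Nat) (v : Int)
    (hi : i < M.length) (hj : j < (M.getD i []).length) :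
    cellD (pySetCell M i j v) a b = if a = i ∧ b = j then v else cellD M a b := by
  unfold pySetCell cellD
  by_cases hai : a = i
  · subst hai
    rw [getDl_set_self _ _ _ hi]
    by_cases hbj : b = j
    · subst hbj
      rw [getD_set_self' _ _ _ hj, if_pos ⟨rfl, rfl⟩]
    · rw [getD_set_ne' _ _ _ _ (fun h => hbj h.symm), if_neg (by tauto)]
  · rw [getDl_set_ne _ _ _ _ (fun h => hai h.symm), if_neg (by tauto)]

theorem stepCell_shape (t : List (List Int)) (i : Nat) (M : List (List Int)) (j : Nat)
    (h : shapeEq M t) : shapeEq (stepCell t i M j) t := by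
  unfold stepCell
  split_ifs
  · exact shapeEq_set _ _ _ _ _ h
  · exact h

theorem foldl_stepCell_shape (t : List (List Int)) (i : Nat) (J : List Nat) :
    ∀ M, shapeEq M t → shapeEq (J.foldl (stepCell t i) M) t := by
  induction J with
  | nil => intro M h; simpa using h
  | cons j J ih => intro M h; exact ih _ (stepCell_shape t i M j h)

theorem foldl_stepCell_get (t : List (List Int)) (i : Nat) (hi : i < t.length)
    (a b : Nat) (J : List Nat) (hJ : ∀ j ∈ J, j < (t.getD i []).length) :
    ∀ M, shapeEq M t →
      cellD (J.foldl (stepCell t i) M) a b =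
        if a = i ∧ b ∈ J ∧ cellD t i b > 0 then
          max 0 (cellD t i b - countA t i b)
        else cellD M a b := by
  induction J with
  | nil => intro M _; simp
  | cons j J ih =>
    intro M hM
    rw [List.foldl_cons,
      ih (fun x hx => hJ x (List.mem_cons_of_mem j hx)) _ (stepCell_shape t i M j hM)]
    have hstep : cellD (stepCell t i M j) a b =
        if a = i ∧ b = j ∧ cellD t i b > 0 then max 0 (cellD t i b - countA t i b)
        else cellD M a b := by
      unfold stepCell
      by_cases hab : a = i ∧ b = j
      · obtain ⟨ha', hb'⟩ := hab
        subst ha'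
        subst hb'
        by_cases hv : cellD t a b > 0
        · rw [if_pos hv,
            setCell_get M a b a b _ (by rw [hM.1]; exact hi)
              (by rw [hM.2 a]; exact hJ b List.mem_cons_self),
            if_pos ⟨rfl, rfl⟩, if_pos ⟨rfl, rfl, hv⟩]
        · rw [if_neg hv, if_neg (by tauto)]
      · have hx2 : ¬(a = i ∧ b = j ∧ cellD t i b > 0) := fun h => hab ⟨h.1, h.2.1⟩
        rw [if_neg hx2]
        split_ifs with hv
        · rw [setCell_get M i j a b _ (by rw [hM.1]; exact hi)
            (by rw [hM.2 i]; exact hJ j List.mem_cons_self), if_neg hab]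
        · rfl
    rw [hstep]
    by_cases haeq : a = i
    · subst haeq
      simp only [List.mem_cons]
      split_ifs <;> first | rfl | tauto
    · simp only [List.mem_cons]
      split_ifs <;> first | rfl | tauto

theorem stepRow_shape (t : List (List Int)) (M : List (List Int)) (i : Nat)
    (h : shapeEq M t) : shapeEq (stepRow t M i) t :=
  foldl_stepCell_shape t i _ M h

theorem foldl_stepRow_shape (t : List (List Int)) (I : List Nat) :
    ∀ M, shapeEq M t → shapeEq (I.foldl (stepRow t) M) t := by
  induction I with
  | nil => intro M h; simpa using h
  | cons i I ih => intro M h; exact ih _ (stepRow_shape t M i h)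

theorem foldl_stepRow_get (t : List (List Int)) (a b : Nat) (I : List Nat)
    (hI : ∀ i ∈ I, i < t.length) :
    ∀ M, shapeEq M t →
      cellD (I.foldl (stepRow t) M) a b =
        if a ∈ I ∧ b < (t.getD a []).length ∧ cellD t a b > 0 then
          max 0 (cellD t a b - countA t a b)
        else cellD M a b := by
  induction I with
  | nil => intro M _; simp
  | cons i I ih =>
    intro M hM
    rw [List.foldl_cons,
      ih (fun x hx => hI x (List.mem_cons_of_mem i hx)) _ (stepRow_shape t M i hM)]
    have hstep : cellD (stepRow t M i) a b =
        if a = i ∧ b < (t.getD i []).length ∧ cellD t i b > 0 then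
          max 0 (cellD t i b - countA t i b)
        else cellD M a b := by
      unfold stepRow
      rw [foldl_stepCell_get t i (hI i List.mem_cons_self) a b _
        (fun j hj => List.mem_range.mp hj) M hM]
      simp only [List.mem_range]
    rw [hstep]
    by_cases haeq : a = i
    · subst haeq
      simp only [List.mem_cons]
      split_ifs <;> first | rfl | tauto
    · simp only [List.mem_cons]
      split_ifs <;> first | rfl | tauto

theorem res0_shape (t : List (List Int)) (hp : Pre_year_after t) :
    shapeEq (t.map (fun _ => List.replicate ((t.getD 0 []).length) (0 : Int))) t := by
  refine ⟨by simp, fun a => ?_⟩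
  by_cases ha : a < t.length
  · rw [List.getD_eq_getElem _ _ (by simpa using ha), List.getElem_map,
      List.length_replicate]
    exact (rect_row t hp a ha).symm
  · rw [List.getD_eq_default _ _ (by simpa using ha), List.getD_eq_default _ _ (by omega)]

theorem res0_zero (t : List (List Int)) (a b : Nat) :
    cellD (t.map (fun _ => List.replicate ((t.getD 0 []).length) (0 : Int))) a b = 0 := by
  unfold cellD
  apply getD_zero_of_all
  intro x hx
  by_cases ha : a < (t.map (fun _ : List Int => List.replicate ((t.getD 0 []).length) (0 : Int))).length
  · rw [List.getD_eq_getElem _ _ ha, List.getElem_map] at hx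
    exact List.eq_of_mem_replicate hx
  · rw [List.getD_eq_default _ _ (by omega)] at hx
    simp at hx

theorem year_after_shape (t : List (List Int)) (hp : Pre_year_after t) :
    shapeEq (year_after t) t := by
  unfold year_after
  exact foldl_stepRow_shape t (List.range t.length) _ (res0_shape t hp)

theorem year_after_cell (t : List (List Int)) (hp : Pre_year_after t) (a b : Nat) :
    cellD (year_after t) a b =
      if a < t.length ∧ b < (t.getD a []).length ∧ cellD t a b > 0 then
        max 0 (cellD t a b - countA t a b)
      else 0 := by
  unfold year_after
  rw [foldl_stepRow_get t a b (List.range t.length)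
    (fun i hi => List.mem_range.mp hi) _ (res0_shape t hp)]
  rw [res0_zero]
  simp only [List.mem_range]

theorem year_after_main (t : List (List Int)) (hp : Pre_year_after t) :
    year_after t = year_after_alt t := by
  have hAshape := year_after_shape t hp
  have hBlen : (year_after_alt t).length = t.length := by
    unfold year_after_alt
    simp
  apply List.ext_getElem (by rw [hAshape.1, hBlen])
  intro i hi1 hi2
  have hin : i < t.length := by rw [hAshape.1] at hi1; exact hi1
  have hBrow : (year_after_alt t)[i]'hi2 =
      (t[i]'hin).zipIdx.map (fun vj =>
        if vj.1 > 0 then max 0 (vj.1 - cellD (meltOf t) i vj.2) else 0) := by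
    unfold year_after_alt
    rw [List.getElem_map]
    simp only [List.getElem_zipIdx, zero_add]
  have hrowlen : ((year_after t)[i]'hi1).length = (t.getD i []).length := by
    have h := hAshape.2 i
    rw [List.getD_eq_getElem _ _ hi1] at h
    exact h
  apply List.ext_getElem
  · rw [hBrow, hrowlen]
    simp only [List.length_map, List.length_zipIdx]
    rw [List.getD_eq_getElem _ _ hin]
  · intro j hj1 hj2
    have hjrow : j < (t.getD i []).length := by rw [← hrowlen]; exact hj1
    have hjt : j < (t[i]'hin).length := by
      rw [← List.getD_eq_getElem _ _ hin]
      exact hjrow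
    have hA : ((year_after t)[i]'hi1)[j]'hj1 = cellD (year_after t) i j := by
      unfold cellD
      rw [List.getD_eq_getElem _ _ hi1, List.getD_eq_getElem _ _ hj1]
    rw [hA, year_after_cell t hp i j]
    simp only [hBrow, List.getElem_map, List.getElem_zipIdx, zero_add]
    have hct : cellD t i j = (t[i]'hin)[j]'hjt := by
      unfold cellD
      rw [List.getD_eq_getElem _ _ hin, List.getD_eq_getElem _ _ hjt]
    have hcnt : cellD (meltOf t) i j = countA t i j := by
      rw [meltOf_cell t i j hin hjrow, countA_eq t hp i j hin]
      push_cast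
      ring
    rw [← hct, hcnt]
    split_ifs <;> first | rfl | tauto

-- ===== VERDICT (by name: the statement is the Claim_ definition above) =====
theorem year_after_spec : Claim_equal_year_after := by
  intro table _ hpre
  unfold Spec_year_after
  exact year_after_main table hpre
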